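-- pv_equiv track=rewrite | github.com/its-sachin/Codeforces | Socp mid season/t.py | build
-- ===== SOURCE A (Python) =====
-- def build(n):
--     l=[1]*(n+1)
--     t=4;upd=5
--     while(t<=n):
--         k=t
--         while(k<=n):
--             l[k]=t
--             k+=t
--         t+=upd
--         upd+=2
--     return l
-- ===== SOURCE B (Python) =====
-- def build(n):
--     spf = list(range(n + 1))
--     i = 2
--     while i * i <= n:
--         if spf[i] == i:
--             for m in range(i * i, n + 1, i):
--                 if spf[m] == m:
--                     spf[m] = i
--         i += 1
--     l = [1] * (n + 1)
--     for k in range(2, n + 1):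
--         p = spf[k]
--         q = p * p
--         if k % q == 0:
--             l[k] = q * l[k // q]
--         else:
--             l[k] = l[k // p]
--     return l
-- ===== Notes on version B (the rewrite author's own statement) =====
-- stated objective: alternative
-- what changed: A writes the answers directly with a sieve over perfect squares (outer loop over squares, inner loop over their multiples, later squares overwriting); B never enumerates squares: it builds a smallest-prime-factor table with an Eratosthenes-style prime sieve and then fills the result with the factorization-based dynamic-programming recurrence l[k] = p*p*l[k//(p*p)] if p*p divides k else l[k//p], where p = spf[k].
import Mathlib
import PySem

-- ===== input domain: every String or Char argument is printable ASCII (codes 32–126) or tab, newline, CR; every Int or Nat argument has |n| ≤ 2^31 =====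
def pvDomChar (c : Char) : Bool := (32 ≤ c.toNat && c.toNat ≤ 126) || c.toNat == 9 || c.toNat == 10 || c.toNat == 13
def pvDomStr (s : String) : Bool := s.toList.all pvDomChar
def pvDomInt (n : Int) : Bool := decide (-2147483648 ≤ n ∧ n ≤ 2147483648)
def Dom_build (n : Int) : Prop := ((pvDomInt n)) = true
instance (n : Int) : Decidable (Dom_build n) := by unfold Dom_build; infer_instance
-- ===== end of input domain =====

-- A sieves multiples of perfect squares; B instead builds a smallest-prime-factor table with a
-- prime sieve and fills the result by the DP recurrence l[k] = p*p*l[k//(p*p)] / l[k//p].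

-- ===== PORT A =====
-- inner 'while k <= n: l[k] = t; k += t' (fuel is a totality guard only: each iteration has
-- k ≤ n and increases k by t ≥ 4, so (n + 1 - k).toNat iterations always suffice)
def buildInner (fuel : Nat) (n t k : Int) (l : List Int) : List Int :=
  match fuel with
  | 0 => l
  | fuel + 1 => if k ≤ n then buildInner fuel n t (k + t) (l.set k.toNat t) else l

-- outer 'while t <= n: …; t += upd; upd += 2' (fuel is a totality guard only)
def buildOuter (fuel : Nat) (n t upd : Int) (l : List Int) : List Int :=
  match fuel with
  | 0 => l
  | fuel + 1 =>
    if t ≤ n then buildOuter fuel n (t + upd) (upd + 2) (buildInner (n + 1 - t).toNat n t t l)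
    else l

def build (n : Int) : List Int :=
  buildOuter (n + 1).toNat n 4 5 (PySem.List.pyRepeat [1] (n + 1))

-- ===== PORT B =====
-- inner 'for m in range(i*i, n+1, i): if spf[m] == m: spf[m] = i' (fuel is a totality guard
-- only: m starts at i*i and grows by i ≥ 2 each iteration)
def sieveInner (fuel : Nat) (n i m : Int) (arr : List Int) : List Int :=
  match fuel with
  | 0 => arr
  | fuel + 1 =>
    if m ≤ n then
      sieveInner fuel n i (m + i)
        (if PySem.List.pyGet? arr m = some m then arr.set m.toNat i else arr)
    else arr

-- outer 'i = 2; while i*i <= n: if spf[i] == i: …; i += 1' (fuel is a totality guard only)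
def sieveOuter (fuel : Nat) (n i : Int) (arr : List Int) : List Int :=
  match fuel with
  | 0 => arr
  | fuel + 1 =>
    if i * i ≤ n then
      sieveOuter fuel n (i + 1)
        (if PySem.List.pyGet? arr i = some i then sieveInner (n + 1 - i * i).toNat n i (i * i) arr
         else arr)
    else arr

-- 'p = spf[k]; q = p*p; l[k] = q*l[k//q] if k % q == 0 else l[k//p]'
def dpStep (spf : List Int) (l : List Int) (k : Int) : List Int :=
  let p := PySem.List.pyGetD spf k 0
  let q := p * p
  if PySem.Int.mod k q = 0 then
    l.set k.toNat (q * PySem.List.pyGetD l (PySem.Int.floordiv k q) 0)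
  else
    l.set k.toNat (PySem.List.pyGetD l (PySem.Int.floordiv k p) 0)

-- 'spf = list(range(n+1)); <sieve>; l = [1]*(n+1); for k in range(2, n+1): <dpStep>'
def build_alt (n : Int) : List Int :=
  (PySem.List.pyRange 2 (n + 1) 1).foldl
    (dpStep (sieveOuter n.toNat n 2 (PySem.List.pyRange 0 (n + 1) 1)))
    (PySem.List.pyRepeat [1] (n + 1))

-- ===== PRECONDITION & SPEC =====
def Spec_build (n : Int) (out : List Int) : Prop := out = build_alt n
instance (n : Int) (out : List Int) : Decidable (Spec_build n out) := by unfold Spec_build; infer_instance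

-- ===== CLAIM (what is proved, stated in full; the proofs are below) =====
def Claim_equal_build : Prop := ∀ (n : Int), Dom_build n → Spec_build n (build n)

-- ===== LEMMAS AND PROOFS =====

-- common abstraction: fold of 'if j*j ∣ i then j*j else acc' for j = lo, …, m
def squareFold (i j m acc : Int) : Int :=
  if _h : j ≤ m then squareFold i (j + 1) m (if j * j ∣ i then j * j else acc) else acc
termination_by (m + 1 - j).toNat
decreasing_by omega

def isq (n : Int) : Int := (Nat.sqrt n.toNat : Int)

lemma le_isq_iff {j n : Int} (hj : 1 ≤ j) (hn : 0 ≤ n) : j ≤ isq n ↔ j * j ≤ n := by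
  unfold isq
  constructor
  · intro h
    have h1 : j.toNat ≤ Nat.sqrt n.toNat := by omega
    have h2 : j.toNat * j.toNat ≤ n.toNat := Nat.le_sqrt.mp h1
    have h3 : ((j.toNat * j.toNat : Nat) : Int) ≤ ((n.toNat : Nat) : Int) := Int.ofNat_le.mpr h2
    push_cast at h3
    rw [Int.toNat_of_nonneg (by omega : (0:Int) ≤ j), Int.toNat_of_nonneg hn] at h3
    exact h3
  · intro h
    have h0 : j.toNat * j.toNat ≤ n.toNat := by
      have h3 : ((j.toNat * j.toNat : Nat) : Int) ≤ ((n.toNat : Nat) : Int) := by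
        push_cast
        rw [Int.toNat_of_nonneg (by omega : (0:Int) ≤ j), Int.toNat_of_nonneg hn]
        exact h
      exact_mod_cast h3
    have := Nat.le_sqrt.mpr h0
    omega

lemma squareFold_last (i j m acc : Int) (h : j ≤ m) :
    squareFold i j m acc = if m * m ∣ i then m * m else squareFold i j (m - 1) acc := by
  rw [squareFold]
  simp only [h, dite_true]
  by_cases hjm : j = m
  · subst hjm
    rw [squareFold]
    simp only [show ¬ (j + 1 ≤ j) by omega, dite_false]
    rw [squareFold]
    simp only [show ¬ (j ≤ j - 1) by omega, dite_false]
  · have h1 : j + 1 ≤ m := by omega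
    rw [squareFold_last i (j + 1) m _ h1]
    conv_rhs => rw [squareFold]
    simp only [show j ≤ m - 1 by omega, dite_true]
termination_by (m - j).toNat
decreasing_by omega

-- ===== A-side loop characterisation =====

lemma buildInner_length :
    ∀ (fuel : Nat) (n t k : Int) (l : List Int), (buildInner fuel n t k l).length = l.length := by
  intro fuel
  induction fuel with
  | zero => intro n t k l; rfl
  | succ f ih =>
    intro n t k l
    simp only [buildInner]
    split
    · rw [ih]; simp
    · rfl

lemma buildOuter_length :
    ∀ (fuel : Nat) (n t upd : Int) (l : List Int), (buildOuter fuel n t upd l).length = l.length := by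
  intro fuel
  induction fuel with
  | zero => intro n t upd l; rfl
  | succ f ih =>
    intro n t upd l
    simp only [buildOuter]
    split
    · rw [ih, buildInner_length]
    · rfl

lemma buildInner_get :
    ∀ (fuel : Nat) (n t k : Int) (l : List Int), 0 < t → 0 < k → (n + 1 - k).toNat ≤ fuel →
      l.length = (n + 1).toNat → ∀ i : Int, 0 ≤ i → i ≤ n →
        (buildInner fuel n t k l)[i.toNat]? =
          if k ≤ i ∧ t ∣ (i - k) then some t else l[i.toNat]? := by
  intro fuel
  induction fuel with
  | zero =>
    intro n t k l ht hk hf hlen i hi0 hin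
    rw [if_neg (by omega)]
    rfl
  | succ f ih =>
    intro n t k l ht hk hf hlen i hi0 hin
    simp only [buildInner]
    by_cases h : k ≤ n
    · simp only [h, if_true]
      rw [ih n t (k + t) _ ht (by omega) (by omega) (by simp [hlen]) i hi0 hin]
      by_cases hik : i = k
      · subst hik
        rw [if_neg (by omega), if_pos ⟨le_refl i, by simp⟩]
        rw [List.getElem?_set_self]
        omega
      · have hne : k.toNat ≠ i.toNat := by omega
        rw [List.getElem?_set_ne hne]
        congr 1
        have : (k + t ≤ i ∧ t ∣ i - (k + t)) ↔ (k ≤ i ∧ t ∣ i - k) := by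
          have e : i - (k + t) = (i - k) - t := by ring
          rw [e]
          constructor
          · rintro ⟨h1, d⟩
            have h3 := dvd_add d (dvd_refl t)
            refine ⟨by omega, ?_⟩
            simpa using h3
          · rintro ⟨h1, d⟩
            have h2 : t ≤ i - k := Int.le_of_dvd (by omega) d
            exact ⟨by omega, dvd_sub d (dvd_refl t)⟩
        simp only [this]
    · simp only [h, if_false]
      rw [if_neg (by omega)]

lemma buildOuter_get_zero :
    ∀ (fuel : Nat) (n t upd : Int) (l : List Int), 0 < t → 0 < upd → (n + 1 - t).toNat ≤ fuel →
      l.length = (n + 1).toNat → (buildOuter fuel n t upd l)[(0:Nat)]? = l[(0:Nat)]? := by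
  intro fuel
  induction fuel with
  | zero => intro n t upd l ht hupd hf hlen; rfl
  | succ f ih =>
    intro n t upd l ht hupd hf hlen
    simp only [buildOuter]
    by_cases h : t ≤ n
    · simp only [h, if_true]
      rw [ih n (t + upd) (upd + 2) _ (by omega) (by omega) (by omega)
        (by rw [buildInner_length]; exact hlen)]
      have := buildInner_get (n + 1 - t).toNat n t t l ht ht (le_refl _) hlen 0 (le_refl 0) (by omega)
      simp only [Int.toNat_zero] at this
      rw [this, if_neg (by omega)]
    · simp only [h, if_false]

lemma buildOuter_get :
    ∀ (fuel : Nat) (n j : Int) (l : List Int), 2 ≤ j → (n + 1 - j * j).toNat ≤ fuel →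
      l.length = (n + 1).toNat →
      (∀ i : Int, 1 ≤ i → i ≤ n → l[i.toNat]? = some (squareFold i 2 (j - 1) 1)) →
      ∀ i : Int, 1 ≤ i → i ≤ n →
        (buildOuter fuel n (j * j) (2 * j + 1) l)[i.toNat]? =
          some (squareFold i 2 (max (isq n) (j - 1)) 1) := by
  intro fuel
  induction fuel with
  | zero =>
    intro n j l hj hf hlen H i hi1 hin
    have h : ¬ j * j ≤ n := by omega
    have hlt : isq n ≤ j - 1 := by
      by_cases hn0 : 0 ≤ n
      · by_contra hc
        have : j ≤ isq n := by omega
        exact h ((le_isq_iff (by omega) hn0).mp this)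
      · have hz : n.toNat = 0 := by omega
        unfold isq
        rw [hz]
        simp
        omega
    rw [show max (isq n) (j - 1) = j - 1 by omega]
    exact H i hi1 hin
  | succ f ih =>
    intro n j l hj hf hlen H i hi1 hin
    simp only [buildOuter]
    by_cases h : j * j ≤ n
    · have hn0 : 0 ≤ n := by nlinarith
      have hjs : j ≤ isq n := (le_isq_iff (by omega) hn0).mpr h
      simp only [h, if_true]
      have e1 : j * j + (2 * j + 1) = (j + 1) * (j + 1) := by ring
      have e2 : 2 * j + 1 + 2 = 2 * (j + 1) + 1 := by ring
      rw [e1, e2]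
      have H' : ∀ i' : Int, 1 ≤ i' → i' ≤ n →
          (buildInner (n + 1 - j * j).toNat n (j * j) (j * j) l)[i'.toNat]? =
            some (squareFold i' 2 ((j + 1) - 1) 1) := by
        intro i' hi1' hin'
        rw [buildInner_get (n + 1 - j * j).toNat n (j * j) (j * j) l (by nlinarith)
          (by nlinarith) (le_refl _) hlen i' (by omega) hin']
        have hc : (j * j ≤ i' ∧ j * j ∣ i' - j * j) ↔ j * j ∣ i' := by
          constructor
          · rintro ⟨h1, d⟩
            have : i' = (i' - j * j) + j * j := by ring
            rw [this]
            exact dvd_add d (dvd_refl _)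
          · intro d
            have h1 : j * j ≤ i' := Int.le_of_dvd (by omega) d
            exact ⟨h1, dvd_sub d (dvd_refl _)⟩
        simp only [hc]
        rw [show (j + 1) - 1 = j by ring, squareFold_last i' 2 j 1 (by omega)]
        rw [H i' hi1' hin']
        by_cases hd : j * j ∣ i' <;> simp [hd]
      have hdec : j * j + 5 ≤ (j + 1) * (j + 1) := by nlinarith
      have := ih n (j + 1) (buildInner (n + 1 - j * j).toNat n (j * j) (j * j) l) (by omega)
        (by omega) (by rw [buildInner_length]; exact hlen) H' i hi1 hin
      rw [this]
      rw [show max (isq n) ((j + 1) - 1) = isq n by omega,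
          show max (isq n) (j - 1) = isq n by omega]
    · simp only [h, if_false]
      rw [H i hi1 hin]
      have hlt : isq n ≤ j - 1 := by
        by_cases hn0 : 0 ≤ n
        · by_contra hc
          have : j ≤ isq n := by omega
          exact h ((le_isq_iff (by omega) hn0).mp this)
        · have hz : n.toNat = 0 := by omega
          unfold isq
          rw [hz]
          simp
          omega
      rw [show max (isq n) (j - 1) = j - 1 by omega]

-- ===== number-theoretic spec: the DP recurrence computes the largest square divisor =====

-- Nat-level value of B's DP recurrence
def Srec (k : Nat) : Nat :=
  if _h : k < 2 then 1
  else if k.minFac * k.minFac ∣ k then k.minFac * k.minFac * Srec (k / (k.minFac * k.minFac))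
  else Srec (k / k.minFac)
termination_by k
decreasing_by
  · have hp := (Nat.minFac_prime (show k ≠ 1 by omega)).two_le
    exact Nat.div_lt_self (by omega) (by nlinarith)
  · have hp := (Nat.minFac_prime (show k ≠ 1 by omega)).two_le
    exact Nat.div_lt_self (by omega) (by omega)

lemma Srec_spec : ∀ k : Nat, 1 ≤ k →
    (∃ d, 1 ≤ d ∧ Srec k = d * d ∧ d * d ∣ k) ∧
    (∀ d, 1 ≤ d → d * d ∣ k → d * d ≤ Srec k) := by
  intro k
  induction k using Nat.strong_induction_on with
  | _ k ih =>
  intro hk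
  by_cases h2 : k < 2
  · have hk1 : k = 1 := by omega
    subst hk1
    have hS : Srec 1 = 1 := by unfold Srec; norm_num
    refine ⟨⟨1, le_refl 1, by rw [hS], by norm_num⟩, ?_⟩
    intro d hd hdvd
    have := Nat.le_of_dvd (by norm_num) hdvd
    rw [hS]; nlinarith
  · have hkne1 : k ≠ 1 := by omega
    have hp : k.minFac.Prime := Nat.minFac_prime hkne1
    have hpd : k.minFac ∣ k := Nat.minFac_dvd k
    have hp2 : 2 ≤ k.minFac := hp.two_le
    set p := k.minFac with hpdef
    by_cases hq : p * p ∣ k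
    · have hSk : Srec k = p * p * Srec (k / (p * p)) := by
        rw [Srec]
        simp only [h2, dite_false]
        rw [← hpdef, if_pos hq]
      have hppk : p * p ≤ k := Nat.le_of_dvd (by omega) hq
      set m := k / (p * p) with hmdef
      have hkm : p * p * m = k := Nat.mul_div_cancel' hq
      have hm1 : 1 ≤ m := Nat.div_pos hppk (by positivity)
      have hmlt : m < k := Nat.div_lt_self (by omega) (by nlinarith)
      obtain ⟨⟨e, he1, heq, hedvd⟩, hmax⟩ := ih m hmlt hm1
      refine ⟨⟨p * e, by nlinarith, ?_, ?_⟩, ?_⟩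
      · rw [hSk, heq]; ring
      · have h1 : p * p * (e * e) ∣ p * p * m := mul_dvd_mul_left _ hedvd
        rw [hkm] at h1
        have h2' : p * e * (p * e) = p * p * (e * e) := by ring
        rw [h2']; exact h1
      · intro d hd hdvd
        by_cases hpdvd : p ∣ d
        · obtain ⟨d', rfl⟩ := hpdvd
          have hd' : 1 ≤ d' := by
            rcases Nat.eq_zero_or_pos d' with h | h
            · subst h; simp at hd
            · exact h
          have hdd : p * p * (d' * d') ∣ p * p * m := by
            have he : p * d' * (p * d') = p * p * (d' * d') := by ring
            rw [hkm, ← he]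
            exact hdvd
          have hdm := (Nat.mul_dvd_mul_iff_left (show 0 < p * p by positivity)).mp hdd
          have hle := hmax d' hd' hdm
          calc p * d' * (p * d') = p * p * (d' * d') := by ring
            _ ≤ p * p * Srec m := Nat.mul_le_mul_left _ hle
            _ = Srec k := hSk.symm
        · have hc : Nat.Coprime p d := (Nat.Prime.coprime_iff_not_dvd hp).mpr hpdvd
          have hc2 : Nat.Coprime (p * p) (d * d) := by
            have ha : Nat.Coprime p (d * d) := Nat.Coprime.mul_right hc hc
            exact Nat.Coprime.mul_left ha ha
          have hdm : d * d ∣ m := by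
            have h1 : d * d ∣ m * (p * p) := by rw [mul_comm m (p * p), hkm]; exact hdvd
            exact (hc2.symm).dvd_of_dvd_mul_right h1
          have hle := hmax d hd hdm
          have hS1 : 1 ≤ Srec m := by rw [heq]; nlinarith
          calc d * d ≤ Srec m := hle
            _ ≤ p * p * Srec m := Nat.le_mul_of_pos_left _ (by positivity)
            _ = Srec k := hSk.symm
    · have hSk : Srec k = Srec (k / p) := by
        rw [Srec]
        simp only [h2, dite_false]
        rw [← hpdef, if_neg hq]
      set m := k / p with hmdef
      have hkm : p * m = k := Nat.mul_div_cancel' hpd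
      have hm1 : 1 ≤ m := Nat.div_pos (Nat.le_of_dvd (by omega) hpd) (by omega)
      have hmlt : m < k := Nat.div_lt_self (by omega) (by omega)
      obtain ⟨⟨e, he1, heq, hedvd⟩, hmax⟩ := ih m hmlt hm1
      refine ⟨⟨e, he1, by rw [hSk, heq], hedvd.trans ⟨p, by rw [← hkm]; ring⟩⟩, ?_⟩
      intro d hd hdvd
      have hpdvd : ¬ p ∣ d := by
        intro hpd2
        apply hq
        obtain ⟨d', rfl⟩ := hpd2
        exact (show p * p ∣ p * d' * (p * d') from ⟨d' * d', by ring⟩).trans hdvd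
      have hc : Nat.Coprime p d := (Nat.Prime.coprime_iff_not_dvd hp).mpr hpdvd
      have hc2 : Nat.Coprime p (d * d) := Nat.Coprime.mul_right hc hc
      have hdm : d * d ∣ m := by
        have h1 : d * d ∣ m * p := by rw [mul_comm m p, hkm]; exact hdvd
        exact (hc2.symm).dvd_of_dvd_mul_right h1
      rw [hSk]
      exact hmax d hd hdm

-- the fold's result is always a square divisor of k (accumulator-generalised)
lemma squareFold_sq (lo M k acc : Int) (hlo : 1 ≤ lo)
    (hacc : ∃ d : Int, 1 ≤ d ∧ acc = d * d ∧ d * d ∣ k) :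
    ∃ d : Int, 1 ≤ d ∧ squareFold k lo M acc = d * d ∧ d * d ∣ k := by
  rw [squareFold]
  by_cases h : lo ≤ M
  · simp only [h, dite_true]
    refine squareFold_sq (lo + 1) M k _ (by omega) ?_
    by_cases hd : lo * lo ∣ k
    · simp only [hd, if_true]
      exact ⟨lo, hlo, rfl, hd⟩
    · simp only [hd, if_false]
      exact hacc
  · simp only [h, dite_false]
    exact hacc
termination_by (M + 1 - lo).toNat
decreasing_by omega

-- the fold dominates every square divisor whose root lies in range
lemma squareFold_ge_sq (M k d : Int) (hd : 2 ≤ d) (hdM : d ≤ M) (hdvd : d * d ∣ k) :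
    d * d ≤ squareFold k 2 M 1 := by
  rw [squareFold_last k 2 M 1 (by omega)]
  by_cases hM : M * M ∣ k
  · simp only [hM, if_true]
    nlinarith
  · simp only [hM, if_false]
    have hne : d ≠ M := by rintro rfl; exact hM hdvd
    exact squareFold_ge_sq (M - 1) k d hd (by omega) hdvd
termination_by (M - d).toNat
decreasing_by omega

-- squares above isq i never divide i, so the fold's upper bound can be lowered to isq i
lemma squareFold_trunc : ∀ (M i : Int), 1 ≤ i → isq i ≤ M →
    squareFold i 2 M 1 = squareFold i 2 (isq i) 1 := by
  intro M i hi hM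
  by_cases he : M = isq i
  · rw [he]
  · have hlt : isq i < M := by omega
    by_cases h2 : 2 ≤ M
    · have hnd : ¬ (M * M ∣ i) := by
        intro hd
        have h1 : M * M ≤ i := Int.le_of_dvd (by omega) hd
        have : M ≤ isq i := (le_isq_iff (by omega) (by omega)).mpr h1
        omega
      rw [squareFold_last i 2 M 1 h2, if_neg hnd]
      exact squareFold_trunc (M - 1) i hi (by omega)
    · have hisq : isq i < 2 := by omega
      rw [squareFold]
      simp only [show ¬ ((2:Int) ≤ M) by omega, dite_false]
      rw [squareFold]
      simp only [show ¬ ((2:Int) ≤ isq i) by omega, dite_false]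
termination_by M => (M + 1).toNat
decreasing_by omega

lemma isq_mono {a b : Int} (h : a ≤ b) : isq a ≤ isq b := by
  unfold isq
  have : a.toNat ≤ b.toNat := by omega
  exact_mod_cast Nat.sqrt_le_sqrt this

-- link: A's per-element value is exactly the DP recurrence's value
lemma squareFold_eq_Srec (k M : Int) (hk : 1 ≤ k) (hM : isq k ≤ M) :
    squareFold k 2 M 1 = (Srec k.toNat : Int) := by
  rw [squareFold_trunc M k hk hM]
  obtain ⟨⟨e, he1, heq, hedvd⟩, hmax⟩ := Srec_spec k.toNat (by omega)
  obtain ⟨d, hd1, hFeq, hFdvd⟩ :=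
    squareFold_sq 2 (isq k) k 1 (by norm_num) ⟨1, by norm_num, by norm_num, one_dvd k⟩
  have hkc : ((k.toNat : Nat) : Int) = k := Int.toNat_of_nonneg (by omega)
  have h1 : squareFold k 2 (isq k) 1 ≤ (Srec k.toNat : Int) := by
    have hdNat : d.toNat * d.toNat ∣ k.toNat := by
      have hc : ((d.toNat * d.toNat : Nat) : Int) ∣ ((k.toNat : Nat) : Int) := by
        push_cast
        rw [Int.toNat_of_nonneg (by omega : (0:Int) ≤ d), hkc]
        exact hFdvd
      exact_mod_cast hc
    have hle := hmax d.toNat (by omega) hdNat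
    have hle' : ((d.toNat * d.toNat : Nat) : Int) ≤ (Srec k.toNat : Int) := by exact_mod_cast hle
    rw [hFeq]
    push_cast at hle'
    rw [Int.toNat_of_nonneg (by omega : (0:Int) ≤ d)] at hle'
    exact hle'
  have h2 : (Srec k.toNat : Int) ≤ squareFold k 2 (isq k) 1 := by
    have heI : ((e : Int)) * (e : Int) ∣ k := by
      have hc : ((e * e : Nat) : Int) ∣ ((k.toNat : Nat) : Int) := Int.natCast_dvd_natCast.mpr hedvd
      rw [hkc] at hc
      push_cast at hc
      exact hc
    by_cases he2 : 2 ≤ e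
    · have hek : (e : Int) * (e : Int) ≤ k := Int.le_of_dvd (by omega) heI
      have heM : (e : Int) ≤ isq k := (le_isq_iff (by exact_mod_cast he1) (by omega)).mpr hek
      have hge := squareFold_ge_sq (isq k) k e (by exact_mod_cast he2) heM heI
      rw [heq]
      push_cast
      exact hge
    · have he1' : e = 1 := by omega
      rw [heq, he1']
      rw [hFeq]
      norm_num
      nlinarith
  omega

-- ===== sieve characterisation =====

lemma minFac_lt_of_composite {x : Nat} (h2 : 2 ≤ x) (hnp : ¬ x.Prime) : x.minFac < x := by
  have hp := Nat.minFac_prime (show x ≠ 1 by omega)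
  have hd := Nat.minFac_dvd x
  have hle : x.minFac ≤ x := Nat.le_of_dvd (by omega) hd
  rcases lt_or_eq_of_le hle with h | h
  · exact h
  · exact absurd (h ▸ hp) hnp

lemma minFac_sq_le {x : Nat} (h2 : 2 ≤ x) (hnp : ¬ x.Prime) : x.minFac * x.minFac ≤ x := by
  obtain ⟨t, ht⟩ := Nat.minFac_dvd x
  have hp := Nat.minFac_prime (show x ≠ 1 by omega)
  have ht1 : t ≠ 1 := by
    rintro rfl
    rw [mul_one] at ht
    exact hnp (ht ▸ hp)
  have ht0 : t ≠ 0 := by rintro rfl; omega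
  have hmt : x.minFac ≤ t := Nat.minFac_le_of_dvd (by omega) ⟨x.minFac, by rw [mul_comm]; exact ht⟩
  calc x.minFac * x.minFac ≤ x.minFac * t := Nat.mul_le_mul_left _ hmt
    _ = x := ht.symm

-- state of the spf array after the outer sieve loop has processed i = 2, …, I
def spfVal (I : Int) (x : Nat) : Int :=
  if 2 ≤ x ∧ ¬ x.Prime ∧ (x.minFac : Int) ≤ I then (x.minFac : Int) else (x : Int)

lemma spfVal_pos (I : Int) (x : Nat) (h1 : 2 ≤ x) (h2 : ¬ x.Prime) (h3 : (x.minFac : Int) ≤ I) :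
    spfVal I x = (x.minFac : Int) := by
  unfold spfVal
  exact if_pos ⟨h1, h2, h3⟩

lemma spfVal_neg (I : Int) (x : Nat) (h : ¬ (2 ≤ x ∧ ¬ x.Prime ∧ (x.minFac : Int) ≤ I)) :
    spfVal I x = (x : Int) := by
  unfold spfVal
  exact if_neg h

lemma sieveInner_length :
    ∀ (fuel : Nat) (n i m : Int) (arr : List Int), (sieveInner fuel n i m arr).length = arr.length := by
  intro fuel
  induction fuel with
  | zero => intro n i m arr; rfl
  | succ f ih =>
    intro n i m arr
    simp only [sieveInner]
    split
    · rw [ih]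
      split <;> simp
    · rfl

lemma sieveInner_get :
    ∀ (fuel : Nat) (n i m : Int) (arr : List Int), 0 < i → 0 < m → (n + 1 - m).toNat ≤ fuel →
      arr.length = (n + 1).toNat → ∀ x : Int, 0 ≤ x → x ≤ n →
        (sieveInner fuel n i m arr)[x.toNat]? =
          if m ≤ x ∧ i ∣ (x - m) ∧ arr[x.toNat]? = some x then some i else arr[x.toNat]? := by
  intro fuel
  induction fuel with
  | zero =>
    intro n i m arr hi hm hf hlen x hx0 hxn
    rw [if_neg (by omega)]
    rfl
  | succ f ih =>
    intro n i m arr hi hm hf hlen x hx0 hxn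
    simp only [sieveInner]
    by_cases h : m ≤ n
    · simp only [h, if_true]
      have hget : PySem.List.pyGet? arr m = arr[m.toNat]? :=
        PySem.List.pyGet?_of_nonneg _ (by omega)
      have hlen' : (if PySem.List.pyGet? arr m = some m then arr.set m.toNat i else arr).length
          = (n + 1).toNat := by
        split <;> simp [hlen]
      rw [ih n i (m + i) _ hi (by omega) (by omega) hlen' x hx0 hxn]
      by_cases hxm : x = m
      · subst hxm
        rw [if_neg (by omega)]
        rw [hget]
        by_cases h1 : arr[x.toNat]? = some x
        · rw [if_pos h1,
            if_pos (show x ≤ x ∧ i ∣ x - x ∧ arr[x.toNat]? = some x from ⟨le_refl x, by simp, h1⟩)]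
          rw [List.getElem?_set_self]
          omega
        · rw [if_neg h1, if_neg (fun hc => h1 hc.2.2)]
      · have hne : m.toNat ≠ x.toNat := by omega
        have hsame : (if PySem.List.pyGet? arr m = some m then arr.set m.toNat i else arr)[x.toNat]?
            = arr[x.toNat]? := by
          split
          · rw [List.getElem?_set_ne hne]
          · rfl
        rw [hsame]
        have hcond : (m + i ≤ x ∧ i ∣ x - (m + i)) ↔ (m ≤ x ∧ i ∣ x - m) := by
          have e : x - (m + i) = (x - m) - i := by ring
          rw [e]
          constructor
          · rintro ⟨h1, d⟩
            have h3 := dvd_add d (dvd_refl i)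
            refine ⟨by omega, ?_⟩
            simpa using h3
          · rintro ⟨h1, d⟩
            have h2 : i ≤ x - m := Int.le_of_dvd (by omega) d
            exact ⟨by omega, dvd_sub d (dvd_refl i)⟩
        have hc2 : (m + i ≤ x ∧ i ∣ x - (m + i) ∧ arr[x.toNat]? = some x)
            ↔ (m ≤ x ∧ i ∣ x - m ∧ arr[x.toNat]? = some x) := by
          constructor
          · rintro ⟨h1, h2, h3⟩
            exact ⟨(hcond.mp ⟨h1, h2⟩).1, (hcond.mp ⟨h1, h2⟩).2, h3⟩
          · rintro ⟨h1, h2, h3⟩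
            exact ⟨(hcond.mpr ⟨h1, h2⟩).1, (hcond.mpr ⟨h1, h2⟩).2, h3⟩
        simp only [hc2]
    · simp only [h, if_false]
      rw [if_neg (by omega)]

-- one outer step (prime row i, or skipped row) advances the invariant from I = i-1 to I = i
lemma spfVal_step_skip (i : Int) (x : Nat) (hnp : ¬ ∃ p : Nat, p.Prime ∧ (p : Int) = i) :
    spfVal i x = spfVal (i - 1) x := by
  unfold spfVal
  by_cases hA : 2 ≤ x ∧ ¬ x.Prime
  · by_cases hm : (x.minFac : Int) ≤ i - 1
    · rw [if_pos ⟨hA.1, hA.2, by omega⟩, if_pos ⟨hA.1, hA.2, hm⟩]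
    · have hne : (x.minFac : Int) ≠ i := by
        intro he
        exact hnp ⟨x.minFac, Nat.minFac_prime (show x ≠ 1 by omega), he⟩
      rw [if_neg (by intro hc; have := hc.2.2; omega), if_neg (by intro hc; exact hm hc.2.2)]
  · rw [if_neg (by intro hc; exact hA ⟨hc.1, hc.2.1⟩), if_neg (by intro hc; exact hA ⟨hc.1, hc.2.1⟩)]

lemma sieveOuter_inv :
    ∀ (fuel : Nat) (n i : Int) (arr : List Int), 2 ≤ i → (isq n + 1 - i).toNat ≤ fuel →
      arr.length = (n + 1).toNat →
      (∀ x : Int, 0 ≤ x → x ≤ n → arr[x.toNat]? = some (spfVal (i - 1) x.toNat)) →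
      ∀ x : Int, 0 ≤ x → x ≤ n →
        (sieveOuter fuel n i arr)[x.toNat]? = some (spfVal (max (isq n) (i - 1)) x.toNat) := by
  intro fuel
  induction fuel with
  | zero =>
    intro n i arr hi hf hlen H x hx0 hxn
    have hmax : max (isq n) (i - 1) = i - 1 := by
      have : 0 ≤ isq n := by unfold isq; positivity
      omega
    rw [hmax]
    exact H x hx0 hxn
  | succ f ih =>
    intro n i arr hi hf hlen H x hx0 hxn
    simp only [sieveOuter]
    by_cases h : i * i ≤ n
    · have hn0 : 0 ≤ n := by nlinarith
      have hiI : i ≤ isq n := (le_isq_iff (by omega) hn0).mpr h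
      simp only [h, if_true]
      have hin : i ≤ n := by nlinarith
      have hgeti : PySem.List.pyGet? arr i = arr[i.toNat]? :=
        PySem.List.pyGet?_of_nonneg _ (by omega)
      have hHi := H i (by omega) hin
      have hic : ((i.toNat : Nat) : Int) = i := Int.toNat_of_nonneg (by omega)
      have hi2 : 2 ≤ i.toNat := by omega
      -- the guard 'spf[i] == i' holds iff i is prime
      have hguard : (PySem.List.pyGet? arr i = some i) ↔ i.toNat.Prime := by
        rw [hgeti, hHi]
        unfold spfVal
        constructor
        · intro hg
          by_contra hnp
          rw [if_pos ⟨hi2, hnp, by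
            have := minFac_lt_of_composite hi2 hnp
            omega⟩] at hg
          have := minFac_lt_of_composite hi2 hnp
          have : ((i.toNat.minFac : Nat) : Int) < i := by omega
          simp only [Option.some_inj] at hg
          omega
        · intro hp
          rw [if_neg (by intro hc; exact hc.2.1 hp), hic]
      -- the new array satisfies the invariant at I = i, whichever branch runs
      have HNEW : ∀ y : Int, 0 ≤ y → y ≤ n →
          (if PySem.List.pyGet? arr i = some i then sieveInner (n + 1 - i * i).toNat n i (i * i) arr
           else arr)[y.toNat]? = some (spfVal i y.toNat) := by
        intro y hy0 hyn
        by_cases hp : i.toNat.Prime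
        · rw [if_pos (hguard.mpr hp)]
          rw [sieveInner_get (n + 1 - i * i).toNat n i (i * i) arr (by omega) (by nlinarith)
            (le_refl _) hlen y hy0 hyn]
          have hyc : ((y.toNat : Nat) : Int) = y := Int.toNat_of_nonneg hy0
          have hdviff : i ∣ y - i * i ↔ i ∣ y := by
            constructor
            · intro hd
              have : y = (y - i * i) + i * i := by ring
              rw [this]
              exact dvd_add hd ⟨i, rfl⟩
            · intro hd
              exact dvd_sub hd ⟨i, rfl⟩
          by_cases hcond : i * i ≤ y ∧ i ∣ (y - i * i) ∧ arr[y.toNat]? = some y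
          · rw [if_pos hcond]
            obtain ⟨hc1, hc2, hc3⟩ := hcond
            have hy2 : 2 ≤ y.toNat := by nlinarith
            have hdy : i.toNat ∣ y.toNat := by
              have := hdviff.mp hc2
              have hcast : ((i.toNat : Nat) : Int) ∣ ((y.toNat : Nat) : Int) := by
                rw [hic, hyc]; exact this
              exact_mod_cast hcast
            have hilt : i < y := by nlinarith
            have hynp : ¬ y.toNat.Prime := by
              intro hP
              rcases (Nat.Prime.eq_one_or_self_of_dvd hP i.toNat hdy) with h' | h' <;> omega
            -- arr[y] = y forces minFac y ≥ i, and i ∣ y forces minFac y ≤ i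
            have hHy := H y hy0 hyn
            rw [hc3] at hHy
            have hmf_le : y.toNat.minFac ≤ i.toNat := Nat.minFac_le_of_dvd (by omega) hdy
            have hmf_ge : ¬ ((y.toNat.minFac : Int) ≤ i - 1) := by
              intro hle
              rw [Option.some_inj] at hHy
              unfold spfVal at hHy
              rw [if_pos ⟨hy2, hynp, hle⟩] at hHy
              have := minFac_lt_of_composite hy2 hynp
              omega
            have hmf : (y.toNat.minFac : Int) = i := by omega
            unfold spfVal
            rw [if_pos ⟨hy2, hynp, by omega⟩, hmf]
          · rw [if_neg hcond]
            rw [H y hy0 hyn]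
            -- the specs at I = i and I = i-1 agree here: minFac y = i would force the condition
            congr 1
            by_cases hA : 2 ≤ y.toNat ∧ ¬ y.toNat.Prime
            · by_cases hm : (y.toNat.minFac : Int) ≤ i - 1
              · rw [spfVal_pos i _ hA.1 hA.2 (by omega), spfVal_pos (i - 1) _ hA.1 hA.2 hm]
              · rw [spfVal_neg (i - 1) _ (fun hc => hm hc.2.2)]
                by_cases hmi : (y.toNat.minFac : Int) ≤ i
                · exfalso
                  have hmf : (y.toNat.minFac : Int) = i := by omega
                  apply hcond
                  have hdy : i.toNat ∣ y.toNat := by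
                    have := Nat.minFac_dvd y.toNat
                    have h' : y.toNat.minFac = i.toNat := by omega
                    rwa [h'] at this
                  have hdyI : i ∣ y := by
                    have hcast : ((i.toNat : Nat) : Int) ∣ ((y.toNat : Nat) : Int) :=
                      Int.natCast_dvd_natCast.mpr hdy
                    rwa [hic, hyc] at hcast
                  have hsq : i * i ≤ y := by
                    have := minFac_sq_le hA.1 hA.2
                    have hcast : ((y.toNat.minFac * y.toNat.minFac : Nat) : Int)
                        ≤ ((y.toNat : Nat) : Int) := by exact_mod_cast this
                    push_cast at hcast
                    rw [hmf, hyc] at hcast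
                    exact hcast
                  refine ⟨hsq, hdviff.mpr hdyI, ?_⟩
                  rw [H y hy0 hyn]
                  rw [spfVal_neg (i - 1) _ (by intro hc; have := hc.2.2; omega), hyc]
                · rw [spfVal_neg i _ (by intro hc; exact hmi hc.2.2), hyc]
            · rw [spfVal_neg i _ (by intro hc; exact hA ⟨hc.1, hc.2.1⟩),
                 spfVal_neg (i - 1) _ (by intro hc; exact hA ⟨hc.1, hc.2.1⟩)]
        · rw [if_neg (fun hg => hp (hguard.mp hg))]
          rw [H y hy0 hyn]
          congr 1
          refine (spfVal_step_skip i y.toNat ?_).symm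
          rintro ⟨p, hpP, hpe⟩
          have : p = i.toNat := by omega
          exact hp (this ▸ hpP)
      have hlen' : (if PySem.List.pyGet? arr i = some i
          then sieveInner (n + 1 - i * i).toNat n i (i * i) arr else arr).length
          = (n + 1).toNat := by
        split
        · rw [sieveInner_length]; exact hlen
        · exact hlen
      have := ih n (i + 1) _ (by omega) (by omega) hlen'
        (by simpa using HNEW) x hx0 hxn
      rw [this]
      rw [show max (isq n) (i + 1 - 1) = isq n by omega,
          show max (isq n) (i - 1) = isq n by omega]
    · simp only [h, if_false]
      have hmax : max (isq n) (i - 1) = i - 1 := by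
        by_cases hn0 : 0 ≤ n
        · by_contra hc
          have h1 : i ≤ isq n := by
            have : 0 ≤ isq n := by unfold isq; positivity
            omega
          exact h ((le_isq_iff (by omega) hn0).mp h1)
        · have hz : n.toNat = 0 := by omega
          unfold isq
          rw [hz]
          simp
          omega
      rw [hmax]
      exact H x hx0 hxn

-- the finished spf table holds the smallest prime factor of every 2 ≤ x ≤ n
lemma sieve_final (n x : Int) (h2 : 2 ≤ x) (hxn : x ≤ n) :
    (sieveOuter n.toNat n 2 (PySem.List.pyRange 0 (n + 1) 1))[x.toNat]? =
      some ((x.toNat.minFac : Int)) := by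
  have harr : ∀ y : Int, 0 ≤ y → y ≤ n →
      (PySem.List.pyRange 0 (n + 1) 1)[y.toNat]? = some (spfVal 1 y.toNat) := by
    intro y hy0 hyn
    rw [PySem.List.pyRange_one, List.getElem?_map, List.getElem?_range (by omega)]
    have hyc : ((y.toNat : Nat) : Int) = y := Int.toNat_of_nonneg hy0
    unfold spfVal
    rw [if_neg (by
      rintro ⟨hA, hB, hC⟩
      have := (Nat.minFac_prime (show y.toNat ≠ 1 by omega)).two_le
      omega)]
    simp [hyc]
  have hlen : (PySem.List.pyRange 0 (n + 1) 1).length = (n + 1).toNat := by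
    rw [PySem.List.length_pyRange_one]
    omega
  have hfuel : (isq n + 1 - 2).toNat ≤ n.toNat := by
    unfold isq
    have := Nat.sqrt_le_self n.toNat
    omega
  have hres := sieveOuter_inv n.toNat n 2 _ (le_refl 2) hfuel hlen harr x (by omega) hxn
  rw [hres]
  have hx2 : 2 ≤ x.toNat := by omega
  congr 1
  unfold spfVal
  by_cases hp : x.toNat.Prime
  · rw [if_neg (by intro hc; exact hc.2.1 hp)]
    have : x.toNat.minFac = x.toNat := by
      have hd := Nat.minFac_dvd x.toNat
      rcases (Nat.Prime.eq_one_or_self_of_dvd hp _ hd) with h' | h'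
      · have := (Nat.minFac_prime (show x.toNat ≠ 1 by omega)).two_le
        omega
      · exact h'
    rw [this, Int.toNat_of_nonneg (by omega)]
  · have hsq := minFac_sq_le hx2 hp
    have hle : x.toNat.minFac * x.toNat.minFac ≤ n.toNat := by omega
    have hb : x.toNat.minFac ≤ Nat.sqrt n.toNat := Nat.le_sqrt.mpr hle
    rw [if_pos ⟨hx2, hp, by unfold isq; omega⟩]

-- ===== DP loop characterisation =====

lemma pyGetD_of_getElem? {l : List Int} {j v : Int} (h0 : 0 ≤ j) (h : l[j.toNat]? = some v) :
    PySem.List.pyGetD l j 0 = v := by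
  obtain ⟨hlt, hv⟩ := List.getElem?_eq_some_iff.mp h
  rw [PySem.List.pyGetD_eq_getElem _ _ h0 (by omega)]
  exact hv

lemma Srec_zero : Srec 0 = 1 := by unfold Srec; norm_num

lemma Srec_one : Srec 1 = 1 := by unfold Srec; norm_num

lemma dpStep_length (spf l : List Int) (k : Int) : (dpStep spf l k).length = l.length := by
  simp only [dpStep]
  split <;> simp

lemma foldl_dpStep_length :
    ∀ (js : List Int) (spf l : List Int), (js.foldl (dpStep spf) l).length = l.length := by
  intro js
  induction js with
  | nil => intro spf l; rfl
  | cons j js ih =>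
    intro spf l
    simp only [List.foldl_cons]
    rw [ih, dpStep_length]

lemma dp_inv (n : Int) (spf : List Int)
    (hspf : ∀ x : Int, 2 ≤ x → x ≤ n → PySem.List.pyGetD spf x 0 = (x.toNat.minFac : Int)) :
    ∀ (K : Int) (l : List Int), 1 ≤ K → K ≤ n → l.length = (n + 1).toNat →
      (∀ x : Int, 0 ≤ x → x ≤ n →
        l[x.toNat]? = some (if x ≤ K then (Srec x.toNat : Int) else 1)) →
      ∀ x : Int, 0 ≤ x → x ≤ n →
        ((PySem.List.pyRange (K + 1) (n + 1) 1).foldl (dpStep spf) l)[x.toNat]? =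
          some (Srec x.toNat : Int) := by
  intro K l hK1 hKn hlen H x hx0 hxn
  by_cases hEnd : K = n
  · subst hEnd
    rw [PySem.List.pyRange_one_eq_nil (by omega)]
    simp only [List.foldl_nil]
    rw [H x hx0 hxn, if_pos hxn]
  · have hKlt : K < n := by omega
    rw [PySem.List.pyRange_one_cons (by omega)]
    simp only [List.foldl_cons]
    have hk2 : 2 ≤ K + 1 := by omega
    have hkn : K + 1 ≤ n := by omega
    have hkc : (((K + 1).toNat : Nat) : Int) = K + 1 := Int.toNat_of_nonneg (by omega)
    set kn := (K + 1).toNat with hkndef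
    have hkn2 : 2 ≤ kn := by omega
    have hpP : kn.minFac.Prime := Nat.minFac_prime (by omega)
    have hp2 : 2 ≤ kn.minFac := hpP.two_le
    have hpd : kn.minFac ∣ kn := Nat.minFac_dvd kn
    have hpk : kn.minFac ≤ kn := Nat.le_of_dvd (by omega) hpd
    have hp := hspf (K + 1) hk2 hkn
    have hp' : PySem.List.pyGetD spf (K + 1) 0 = (kn.minFac : Int) := by
      rw [hp, ← hkndef]
    have hstep : dpStep spf l (K + 1) = l.set kn ((Srec kn : Nat) : Int) := by
      simp only [dpStep]
      rw [hp']
      have hq_iff : PySem.Int.mod (K + 1) ((kn.minFac : Int) * (kn.minFac : Int)) = 0 ↔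
          kn.minFac * kn.minFac ∣ kn := by
        rw [PySem.Int.mod_eq_zero_iff_dvd]
        rw [← hkc]
        exact_mod_cast Int.natCast_dvd_natCast
      by_cases hq : kn.minFac * kn.minFac ∣ kn
      · rw [if_pos (hq_iff.mpr hq)]
        have hfd : PySem.Int.floordiv (K + 1) ((kn.minFac : Int) * (kn.minFac : Int)) =
            ((kn / (kn.minFac * kn.minFac) : Nat) : Int) := by
          rw [← hkc]
          exact_mod_cast PySem.Int.floordiv_natCast kn (kn.minFac * kn.minFac)
        rw [hfd]
        set idx := kn / (kn.minFac * kn.minFac) with hidxdef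
        have hppk : kn.minFac * kn.minFac ≤ kn := Nat.le_of_dvd (by omega) hq
        have hidx1 : 1 ≤ idx := Nat.div_pos hppk (by positivity)
        have hidxlt : idx < kn := Nat.div_lt_self (by omega) (by nlinarith)
        have hidxget : PySem.List.pyGetD l ((idx : Nat) : Int) 0 = (Srec idx : Int) := by
          refine pyGetD_of_getElem? (by positivity) ?_
          rw [Int.toNat_natCast]
          have := H ((idx : Nat) : Int) (by positivity) (by omega)
          rw [Int.toNat_natCast] at this
          rw [this, if_pos (by omega)]
        rw [hidxget]
        have hSrec : Srec kn = kn.minFac * kn.minFac * Srec idx := by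
          rw [Srec]
          simp only [show ¬ kn < 2 by omega, dite_false]
          rw [if_pos hq]
        rw [hSrec, ← hkndef]
        push_cast
        ring_nf
      · rw [if_neg (fun hc => hq (hq_iff.mp hc))]
        have hfd : PySem.Int.floordiv (K + 1) ((kn.minFac : Int)) =
            ((kn / kn.minFac : Nat) : Int) := by
          rw [← hkc]
          exact_mod_cast PySem.Int.floordiv_natCast kn kn.minFac
        rw [hfd]
        set idx := kn / kn.minFac with hidxdef
        have hidx1 : 1 ≤ idx := Nat.div_pos hpk (by omega)
        have hidxlt : idx < kn := Nat.div_lt_self (by omega) (by omega)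
        have hidxget : PySem.List.pyGetD l ((idx : Nat) : Int) 0 = (Srec idx : Int) := by
          refine pyGetD_of_getElem? (by positivity) ?_
          rw [Int.toNat_natCast]
          have := H ((idx : Nat) : Int) (by positivity) (by omega)
          rw [Int.toNat_natCast] at this
          rw [this, if_pos (by omega)]
        rw [hidxget]
        have hSrec : Srec kn = Srec idx := by
          rw [Srec]
          simp only [show ¬ kn < 2 by omega, dite_false]
          rw [if_neg hq]
        rw [hSrec, ← hkndef]
    have H' : ∀ y : Int, 0 ≤ y → y ≤ n →
        (dpStep spf l (K + 1))[y.toNat]? =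
          some (if y ≤ K + 1 then (Srec y.toNat : Int) else 1) := by
      intro y hy0 hyn
      rw [hstep]
      by_cases hyk : y = K + 1
      · subst hyk
        rw [List.getElem?_set_self (by omega)]
        rw [if_pos (le_refl _)]
      · have hne : kn ≠ y.toNat := by omega
        rw [List.getElem?_set_ne hne, H y hy0 hyn]
        congr 1
        have : (y ≤ K + 1) ↔ (y ≤ K) := by omega
        simp only [this]
    have := dp_inv n spf hspf (K + 1) (dpStep spf l (K + 1)) (by omega) hkn
      (by rw [dpStep_length]; exact hlen) H' x hx0 hxn
    exact this
termination_by K => (n - K).toNat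
decreasing_by omega

-- ===== VERDICT (by name: the statement is the Claim_ definition above) =====
theorem build_spec : Claim_equal_build := by
  intro n _
  unfold Spec_build build build_alt
  by_cases hn : 1 ≤ n
  · rw [PySem.List.pyRepeat_singleton]
    set L := (n + 1).toNat with hLdef
    have hlen : (List.replicate L (1:Int)).length = (n + 1).toNat := by simp [hLdef]
    have hspf : ∀ x : Int, 2 ≤ x → x ≤ n →
        PySem.List.pyGetD (sieveOuter n.toNat n 2 (PySem.List.pyRange 0 (n + 1) 1)) x 0 =
          (x.toNat.minFac : Int) := by
      intro x h2 hxn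
      exact pyGetD_of_getElem? (by omega) (sieve_final n x h2 hxn)
    have Hinit : ∀ x : Int, 0 ≤ x → x ≤ n →
        (List.replicate L (1:Int))[x.toNat]? =
          some (if x ≤ 1 then (Srec x.toNat : Int) else 1) := by
      intro x hx0 hxn
      rw [List.getElem?_replicate, if_pos (by omega)]
      congr 1
      by_cases hx1 : x ≤ 1
      · rw [if_pos hx1]
        rcases (show x.toNat = 0 ∨ x.toNat = 1 by omega) with h | h <;>
          rw [h] <;> simp [Srec_zero, Srec_one]
      · rw [if_neg hx1]
    have hB := dp_inv n _ hspf 1 (List.replicate L (1:Int)) (le_refl 1) hn hlen Hinit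
    norm_num at hB
    apply List.ext_getElem?
    intro m
    by_cases hm : m < L
    · have hBm := hB (m : Int) (by omega) (by omega)
      rw [Int.toNat_natCast] at hBm
      rw [hBm]
      rcases Nat.eq_zero_or_pos m with hm0 | hm1
      · subst hm0
        rw [buildOuter_get_zero (n + 1).toNat n 4 5 _ (by norm_num) (by norm_num) (by omega) hlen]
        rw [List.getElem?_replicate, if_pos hm]
        simp [Srec_zero]
      · have hi1 : (1:Int) ≤ (m:Int) := by exact_mod_cast hm1
        have hin : (m:Int) ≤ n := by omega
        have HA : ∀ i : Int, 1 ≤ i → i ≤ n →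
            (List.replicate L (1:Int))[i.toNat]? = some (squareFold i 2 ((2:Int) - 1) 1) := by
          intro i h1 h2
          rw [List.getElem?_replicate, if_pos (by omega)]
          rw [squareFold]
          norm_num
        have hA := buildOuter_get (n + 1).toNat n 2 (List.replicate L (1:Int)) (le_refl 2)
          (by omega) hlen HA (m:Int) hi1 hin
        norm_num at hA
        rw [← hLdef] at hA
        rw [hA]
        have hmono : isq (m:Int) ≤ max (isq n) 1 := by
          have := isq_mono hin
          omega
        rw [squareFold_eq_Srec (m:Int) (max (isq n) 1) hi1 hmono, Int.toNat_natCast]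
    · have h1 : (buildOuter (n + 1).toNat n 4 5 (List.replicate L (1:Int))).length = L := by
        rw [buildOuter_length]; simp
      have h2 : ((PySem.List.pyRange 2 (n + 1) 1).foldl
          (dpStep (sieveOuter n.toNat n 2 (PySem.List.pyRange 0 (n + 1) 1)))
          (List.replicate L (1:Int))).length = L := by
        rw [foldl_dpStep_length]; simp
      rw [List.getElem?_eq_none (h1.le.trans (by omega)),
          List.getElem?_eq_none (h2.le.trans (by omega))]
  · have hA : buildOuter (n + 1).toNat n 4 5 (PySem.List.pyRepeat [1] (n + 1)) =
        PySem.List.pyRepeat [1] (n + 1) := by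
      cases h : (n + 1).toNat with
      | zero => rfl
      | succ f =>
        simp only [buildOuter]
        rw [if_neg (by omega)]
    have hB : PySem.List.pyRange 2 (n + 1) 1 = [] :=
      PySem.List.pyRange_one_eq_nil (by omega)
    rw [hA, hB]
    simp only [List.foldl_nil]
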